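-- pv_equiv track=rewrite | github.com/pptudoukang-netizen/bubble | tools/remove_ui_background.py | get_border_coordinates
-- ===== SOURCE A (Python) =====
-- def get_border_coordinates(width, height, edge_width, sample_step):
--     coordinates = []
--     seen = set()
--     max_edge_x = min(edge_width, width)
--     max_edge_y = min(edge_width, height)
--
--     for y in range(height):
--         for x in range(width):
--             if (
--                 x >= max_edge_x and x < width - max_edge_x and
--                 y >= max_edge_y and y < height - max_edge_y
--             ):
--                 continue
--             if sample_step > 1 and (x + y) % sample_step != 0:
--                 continue
--             key = (x, y)
--             if key not in seen:
--                 seen.add(key)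
--                 coordinates.append(key)
--     return coordinates
-- ===== SOURCE B (Python) =====
-- def get_border_coordinates(width, height, edge_width, sample_step):
--     mex = min(edge_width, width)
--     mey = min(edge_width, height)
--     right = max(mex, width - mex)
--     out = []
--
--     def row(y, a, b):
--         for x in range(a, b):
--             if sample_step <= 1 or (x + y) % sample_step == 0:
--                 out.append((x, y))
--
--     for y in range(height):
--         if y < mey or y >= height - mey:
--             row(y, 0, width)
--         else:
--             row(y, 0, mex)
--             row(y, right, width)
--     return out
-- ===== Notes on version B (the rewrite author's own statement) =====
-- stated objective: alternative
-- what changed: B enumerates only the border bands of each row (full rows at the top/bottom, left and right bands elsewhere) instead of scanning every pixel of the image and skipping the interior one by one, and drops the redundant 'seen' set since the scanned coordinates are already unique; it trades A's uniform full scan for band arithmetic (it skips the interior without visiting it, which helps when the border is thin, but the measured gain on the generated inputs was below 1.5x).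
import Mathlib
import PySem

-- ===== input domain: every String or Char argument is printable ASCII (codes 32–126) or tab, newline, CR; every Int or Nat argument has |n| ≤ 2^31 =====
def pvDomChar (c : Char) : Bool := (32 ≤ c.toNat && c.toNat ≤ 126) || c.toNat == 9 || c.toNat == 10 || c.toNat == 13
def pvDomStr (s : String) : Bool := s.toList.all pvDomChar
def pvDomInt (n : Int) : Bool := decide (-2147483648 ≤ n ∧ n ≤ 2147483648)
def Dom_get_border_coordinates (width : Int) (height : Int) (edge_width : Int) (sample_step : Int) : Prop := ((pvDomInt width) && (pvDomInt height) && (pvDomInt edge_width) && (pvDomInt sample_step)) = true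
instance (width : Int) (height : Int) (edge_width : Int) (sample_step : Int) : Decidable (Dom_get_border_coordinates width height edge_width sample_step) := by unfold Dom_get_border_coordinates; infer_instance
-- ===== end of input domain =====

-- B enumerates only the border bands of each row instead of scanning every pixel and skipping the interior one by one (objective: alternative; not measured faster on the generated inputs).

-- ===== PORT A =====
-- literal transliteration of A: full scan over all (y, x), interior skip, sampling skip,
-- and a 'seen' set guarding the appends (coordinates is the appended list, seen the Python set).
def get_border_coordinates (width : Int) (height : Int) (edge_width : Int) (sample_step : Int) : List (Int × Int) :=
  let max_edge_x := min edge_width width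
  let max_edge_y := min edge_width height
  let res := (PySem.List.pyRange 0 height 1).foldl (fun st y =>
      (PySem.List.pyRange 0 width 1).foldl
        (fun (st : List (Int × Int) × PySem.Set (Int × Int)) x =>
          if max_edge_x ≤ x ∧ x < width - max_edge_x ∧ max_edge_y ≤ y ∧ y < height - max_edge_y then st
          else if 1 < sample_step ∧ PySem.Int.mod (x + y) sample_step ≠ 0 then st
          else if (x, y) ∈ st.2 then st
          else (st.1 ++ [(x, y)], PySem.Set.add st.2 (x, y))) st)
    (([], PySem.Set.ofList []) : List (Int × Int) × PySem.Set (Int × Int))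
  res.1

-- ===== PORT B =====
-- B-side helper: Python B's inner 'row(y, a, b)' loop appending the sampled band pixels to the output list.
def pvRowB (sample_step y a b : Int) (acc : List (Int × Int)) : List (Int × Int) :=
  (PySem.List.pyRange a b 1).foldl
    (fun acc x =>
      if sample_step ≤ 1 ∨ PySem.Int.mod (x + y) sample_step = 0 then acc ++ [(x, y)] else acc) acc

def get_border_coordinates_alt (width : Int) (height : Int) (edge_width : Int) (sample_step : Int) : List (Int × Int) :=
  let mex := min edge_width width
  let mey := min edge_width height
  let right := max mex (width - mex)
  (PySem.List.pyRange 0 height 1).foldl (fun acc y =>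
      if y < mey ∨ height - mey ≤ y then pvRowB sample_step y 0 width acc
      else pvRowB sample_step y right width (pvRowB sample_step y 0 mex acc)) []

-- ===== PRECONDITION & SPEC =====
def Spec_get_border_coordinates (width : Int) (height : Int) (edge_width : Int) (sample_step : Int) (out : List (Int × Int)) : Prop := out = get_border_coordinates_alt width height edge_width sample_step
instance (width : Int) (height : Int) (edge_width : Int) (sample_step : Int) (out : List (Int × Int)) : Decidable (Spec_get_border_coordinates width height edge_width sample_step out) := by unfold Spec_get_border_coordinates; infer_instance

-- ===== CLAIM (what is proved, stated in full; the proofs are below) =====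
def Claim_equal_get_border_coordinates : Prop := ∀ (width : Int) (height : Int) (edge_width : Int) (sample_step : Int), Dom_get_border_coordinates width height edge_width sample_step → Spec_get_border_coordinates width height edge_width sample_step (get_border_coordinates width height edge_width sample_step)

-- ===== LEMMAS AND PROOFS =====

-- A's per-pixel step, named so the proofs can talk about it (definitionally A's inline lambda).
def pvStepA (width height mex mey s y : Int)
    (st : List (Int × Int) × PySem.Set (Int × Int)) (x : Int) :
    List (Int × Int) × PySem.Set (Int × Int) :=
  if mex ≤ x ∧ x < width - mex ∧ mey ≤ y ∧ y < height - mey then st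
  else if 1 < s ∧ PySem.Int.mod (x + y) s ≠ 0 then st
  else if (x, y) ∈ st.2 then st
  else (st.1 ++ [(x, y)], PySem.Set.add st.2 (x, y))

lemma pvInnerA (width height mex mey s y : Int) (l : List Int) :
    ∀ (acc : List (Int × Int)) (seen : PySem.Set (Int × Int)),
      l.Nodup → (∀ x' ∈ l, (x', y) ∉ seen) →
      (l.foldl (pvStepA width height mex mey s y) (acc, seen)).1
        = acc ++ ((l.filter (fun x =>
            decide (¬(mex ≤ x ∧ x < width - mex ∧ mey ≤ y ∧ y < height - mey)
              ∧ (s ≤ 1 ∨ PySem.Int.mod (x + y) s = 0)))).map (fun x => (x, y)))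
      ∧ ∀ p ∈ (l.foldl (pvStepA width height mex mey s y) (acc, seen)).2,
          p ∈ seen ∨ p.2 = y := by
  induction l with
  | nil => intro acc seen _ _; exact ⟨by simp, fun p hp => Or.inl hp⟩
  | cons x t ih =>
    intro acc seen hnd hseen
    have hxt : x ∉ t := (List.nodup_cons.mp hnd).1
    have hnd' : t.Nodup := (List.nodup_cons.mp hnd).2
    simp only [List.foldl_cons, List.filter_cons]
    by_cases hI : mex ≤ x ∧ x < width - mex ∧ mey ≤ y ∧ y < height - mey
    · have hstep : pvStepA width height mex mey s y (acc, seen) x = (acc, seen) := by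
        simp [pvStepA, hI]
      rw [hstep]
      have hcond : (decide (¬(mex ≤ x ∧ x < width - mex ∧ mey ≤ y ∧ y < height - mey)
              ∧ (s ≤ 1 ∨ PySem.Int.mod (x + y) s = 0))) = false := by
        simp [hI]
      rw [hcond]
      exact ih acc seen hnd' (fun x' hx' => hseen x' (List.mem_cons_of_mem _ hx'))
    · by_cases hS : 1 < s ∧ PySem.Int.mod (x + y) s ≠ 0
      · have hstep : pvStepA width height mex mey s y (acc, seen) x = (acc, seen) := by
          simp only [pvStepA, if_neg hI, if_pos hS]
        rw [hstep]
        have hcond : (decide (¬(mex ≤ x ∧ x < width - mex ∧ mey ≤ y ∧ y < height - mey)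
                ∧ (s ≤ 1 ∨ PySem.Int.mod (x + y) s = 0))) = false := by
          simp only [decide_eq_false_iff_not]
          rintro ⟨-, h2⟩
          rcases h2 with h | h
          · omega
          · exact hS.2 h
        rw [hcond]
        exact ih acc seen hnd' (fun x' hx' => hseen x' (List.mem_cons_of_mem _ hx'))
      · have hmem : (x, y) ∉ seen := hseen x (List.mem_cons_self ..)
        have hstep : pvStepA width height mex mey s y (acc, seen) x
            = (acc ++ [(x, y)], PySem.Set.add seen (x, y)) := by
          simp only [pvStepA, if_neg hI, if_neg hS, if_neg hmem]
        rw [hstep]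
        have hcond : (decide (¬(mex ≤ x ∧ x < width - mex ∧ mey ≤ y ∧ y < height - mey)
                ∧ (s ≤ 1 ∨ PySem.Int.mod (x + y) s = 0))) = true := by
          simp only [decide_eq_true_eq]
          refine ⟨hI, ?_⟩
          by_cases h1 : 1 < s
          · right; by_contra h; exact hS ⟨h1, h⟩
          · left; omega
        rw [hcond]
        have hseen' : ∀ x' ∈ t, (x', y) ∉ PySem.Set.add seen (x, y) := by
          intro x' hx' hmem'
          rcases (PySem.Set.mem_add seen (x, y) (x', y)).mp hmem' with h | h
          · exact hseen x' (List.mem_cons_of_mem _ hx') h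
          · exact hxt (by cases h; exact hx')
        obtain ⟨h1, h2⟩ := ih (acc ++ [(x, y)]) (PySem.Set.add seen (x, y)) hnd' hseen'
        refine ⟨by rw [h1]; simp, ?_⟩
        intro p hp
        rcases h2 p hp with h | h
        · rcases (PySem.Set.mem_add seen (x, y) p).mp h with h' | h'
          · exact Or.inl h'
          · right; rw [h']
        · exact Or.inr h

def pvRowA (width height mex mey s y : Int) : List (Int × Int) :=
  ((PySem.List.pyRange 0 width 1).filter (fun x =>
      decide (¬(mex ≤ x ∧ x < width - mex ∧ mey ≤ y ∧ y < height - mey)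
        ∧ (s ≤ 1 ∨ PySem.Int.mod (x + y) s = 0)))).map (fun x => (x, y))

lemma pvOuterA (width height mex mey s : Int) (l : List Int) :
    ∀ (acc : List (Int × Int)) (seen : PySem.Set (Int × Int)),
      l.Nodup → (∀ p ∈ seen, ∀ y' ∈ l, p.2 ≠ y') →
      (l.foldl (fun st y =>
          (PySem.List.pyRange 0 width 1).foldl (pvStepA width height mex mey s y) st)
        (acc, seen)).1
        = l.foldl (fun acc y => acc ++ pvRowA width height mex mey s y) acc := by
  induction l with
  | nil => intro acc seen _ _; rfl
  | cons y t ih =>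
    intro acc seen hnd hseen
    have hyt : y ∉ t := (List.nodup_cons.mp hnd).1
    have hnd' : t.Nodup := (List.nodup_cons.mp hnd).2
    simp only [List.foldl_cons]
    obtain ⟨h1, h2⟩ := pvInnerA width height mex mey s y (PySem.List.pyRange 0 width 1)
      acc seen (PySem.List.nodup_pyRange_one _ _)
      (fun x' _ hm => hseen (x', y) hm y (List.mem_cons_self ..) rfl)
    set st1 := (PySem.List.pyRange 0 width 1).foldl (pvStepA width height mex mey s y) (acc, seen)
      with hst1
    have : st1 = (st1.1, st1.2) := rfl
    rw [this]
    rw [ih st1.1 st1.2 hnd' ?_]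
    · rw [h1]; rfl
    · intro p hp y' hy' hpy
      rcases h2 p hp with h | h
      · exact hseen p h y' (List.mem_cons_of_mem _ hy') hpy
      · exact hyt (by rw [← h, hpy]; exact hy')

def pvRowF (s y a b : Int) : List (Int × Int) :=
  ((PySem.List.pyRange a b 1).filter (fun x =>
      decide (s ≤ 1 ∨ PySem.Int.mod (x + y) s = 0))).map (fun x => (x, y))

lemma pvRowB_eq (s y a b : Int) (acc : List (Int × Int)) :
    pvRowB s y a b acc = acc ++ pvRowF s y a b := by
  unfold pvRowB pvRowF
  exact PySem.List.foldl_append_ite _ _ _ _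

lemma pvRow_eq (width height s : Int) (mex mey : Int) (hmw : mex ≤ width) (y : Int)
    (acc : List (Int × Int)) :
    acc ++ pvRowA width height mex mey s y
      = if y < mey ∨ height - mey ≤ y then acc ++ pvRowF s y 0 width
        else acc ++ pvRowF s y 0 mex ++ pvRowF s y (max mex (width - mex)) width := by
  split_ifs with hb
  · -- border row: the interior test is never satisfied
    congr 1
    unfold pvRowA pvRowF
    congr 1
    apply List.filter_congr
    intro x _
    simp only [decide_eq_decide]
    constructor
    · exact fun h => h.2
    · exact fun h => ⟨by omega, h⟩
  · -- interior row
    rw [List.append_assoc]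
    congr 1
    unfold pvRowA pvRowF
    rw [← List.map_append, ← List.filter_append]
    -- facts about right := max mex (width - mex)
    have hr3 := max_choice mex (width - mex)
    have hr1 : mex ≤ max mex (width - mex) := le_max_left _ _
    have hr2 : width - mex ≤ max mex (width - mex) := le_max_right _ _
    by_cases hm : mex < 0
    · -- every pixel of the row is interior, both sides empty
      have hL : (PySem.List.pyRange 0 width 1).filter (fun x =>
          decide (¬(mex ≤ x ∧ x < width - mex ∧ mey ≤ y ∧ y < height - mey)
            ∧ (s ≤ 1 ∨ PySem.Int.mod (x + y) s = 0))) = [] := by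
        apply List.filter_eq_nil_iff.mpr
        intro x hx
        have := (PySem.List.mem_pyRange_one).mp hx
        simp only [decide_eq_true_eq]
        rintro ⟨hni, -⟩
        exact hni (by omega)
      have e1 : PySem.List.pyRange 0 mex 1 = [] := PySem.List.pyRange_one_eq_nil (by omega)
      have e2 : PySem.List.pyRange (max mex (width - mex)) width 1 = [] :=
        PySem.List.pyRange_one_eq_nil (by omega)
      rw [hL, e1, e2]; simp
    · rw [PySem.List.pyRange_one_append 0 mex width (by omega) hmw,
          PySem.List.pyRange_one_append mex (max mex (width - mex)) width hr1 (by omega),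
          List.filter_append, List.filter_append]
      have hmid : (PySem.List.pyRange mex (max mex (width - mex)) 1).filter (fun x =>
          decide (¬(mex ≤ x ∧ x < width - mex ∧ mey ≤ y ∧ y < height - mey)
            ∧ (s ≤ 1 ∨ PySem.Int.mod (x + y) s = 0))) = [] := by
        apply List.filter_eq_nil_iff.mpr
        intro x hx
        have hx' := (PySem.List.mem_pyRange_one).mp hx
        simp only [decide_eq_true_eq]
        rintro ⟨hni, -⟩
        exact hni (by omega)
      rw [hmid]
      have hseg1 : ∀ x ∈ PySem.List.pyRange 0 mex 1,
          (decide (¬(mex ≤ x ∧ x < width - mex ∧ mey ≤ y ∧ y < height - mey)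
            ∧ (s ≤ 1 ∨ PySem.Int.mod (x + y) s = 0)))
          = decide (s ≤ 1 ∨ PySem.Int.mod (x + y) s = 0) := by
        intro x hx
        have := (PySem.List.mem_pyRange_one).mp hx
        simp only [decide_eq_decide]
        exact ⟨fun h => h.2, fun h => ⟨by omega, h⟩⟩
      have hseg3 : ∀ x ∈ PySem.List.pyRange (max mex (width - mex)) width 1,
          (decide (¬(mex ≤ x ∧ x < width - mex ∧ mey ≤ y ∧ y < height - mey)
            ∧ (s ≤ 1 ∨ PySem.Int.mod (x + y) s = 0)))
          = decide (s ≤ 1 ∨ PySem.Int.mod (x + y) s = 0) := by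
        intro x hx
        have := (PySem.List.mem_pyRange_one).mp hx
        simp only [decide_eq_decide]
        exact ⟨fun h => h.2, fun h => ⟨by omega, h⟩⟩
      rw [List.filter_congr hseg1, List.filter_congr hseg3]
      simp

-- ===== VERDICT (by name: the statement is the Claim_ definition above) =====
theorem get_border_coordinates_spec : Claim_equal_get_border_coordinates := by
  intro width height edge_width sample_step _
  unfold Spec_get_border_coordinates get_border_coordinates get_border_coordinates_alt
  show ((PySem.List.pyRange 0 height 1).foldl (fun st y =>
      (PySem.List.pyRange 0 width 1).foldl
        (pvStepA width height (min edge_width width) (min edge_width height) sample_step y) st)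
      (([], PySem.Set.ofList []) : List (Int × Int) × PySem.Set (Int × Int))).1
    = (PySem.List.pyRange 0 height 1).foldl (fun acc y =>
        if y < min edge_width height ∨ height - min edge_width height ≤ y
        then pvRowB sample_step y 0 width acc
        else pvRowB sample_step y (max (min edge_width width) (width - min edge_width width)) width
               (pvRowB sample_step y 0 (min edge_width width) acc)) []
  rw [pvOuterA width height (min edge_width width) (min edge_width height) sample_step
      (PySem.List.pyRange 0 height 1) [] (PySem.Set.ofList [])
      (PySem.List.nodup_pyRange_one _ _) (by intro p hp; simp [PySem.Set.ofList_nil] at hp)]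
  simp only [pvRowB_eq]
  congr 1
  funext acc y
  exact pvRow_eq width height sample_step (min edge_width width) (min edge_width height)
      (min_le_right _ _) y acc
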